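-- pv_equiv track=rewrite | github.com/2024-2-fundamentos-de-analitica/2024-2-LAB-01-python-basico-WeslyHuertas | function/functions.py | max_min_reducer
-- ===== SOURCE A (Python) =====
-- def max_min_reducer(sequence, reversed = False):
--     result  = {}
--     for key, value in sequence:
--         if not key in result:
--             result[key] = [value, value]
--         elif value < result[key][1]:
--             result[key][1] = value
--         elif value > result[key][0]:
--             result[key][0] = value
--
--     if reversed:
--         return [(key, value[1], value[0]) for key, value in list(result.items())]
--     else:
--         return [(key, value[0], value[1]) for key, value in list(result.items())]
-- ===== SOURCE B (Python) =====
-- def max_min_reducer(sequence, reversed = False):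
--     groups = {}
--     for key, value in sequence:
--         groups.setdefault(key, []).append(value)
--     if reversed:
--         return [(key, min(values), max(values)) for key, values in groups.items()]
--     return [(key, max(values), min(values)) for key, values in groups.items()]
-- ===== Notes on version B (the rewrite author's own statement) =====
-- stated objective: simpler
-- what changed: Replaces the on-the-fly running max/min pair kept per key by a group-then-reduce decomposition: one pass collects each key's values into a list, then the built-in max()/min() reduce each group.
import Mathlib
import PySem

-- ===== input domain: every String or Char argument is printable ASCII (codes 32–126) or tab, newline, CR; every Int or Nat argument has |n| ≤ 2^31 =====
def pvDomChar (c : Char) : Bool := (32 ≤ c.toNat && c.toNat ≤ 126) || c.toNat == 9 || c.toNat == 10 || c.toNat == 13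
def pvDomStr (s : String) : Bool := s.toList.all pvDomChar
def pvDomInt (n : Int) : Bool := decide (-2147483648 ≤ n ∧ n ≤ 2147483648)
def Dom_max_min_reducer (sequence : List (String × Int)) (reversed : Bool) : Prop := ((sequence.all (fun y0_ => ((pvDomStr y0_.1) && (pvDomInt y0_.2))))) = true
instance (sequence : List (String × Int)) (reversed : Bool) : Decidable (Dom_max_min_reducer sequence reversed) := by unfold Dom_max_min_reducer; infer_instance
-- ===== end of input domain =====

-- B replaces A's per-key running (max, min) pair by group-then-reduce: collect each key's
-- values into a list, then take max()/min() of each group (objective: simpler decomposition).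

-- ===== PORT A =====
-- one loop iteration of A: new key ↦ [value, value]; else update min slot, elif update max slot
-- (the in-place list mutations result[key][i] = value keep the key's dict position: Dict.insert overwrites in place;
--  the getD default (0, 0) is unreachable — the branch runs only when the key is present)
def pvStepA (d : PySem.Dict String (Int × Int)) (p : String × Int) : PySem.Dict String (Int × Int) :=
  if !(d.contains p.1) then d.insert p.1 (p.2, p.2)
  else
    let cur := d.getD p.1 (0, 0)
    if p.2 < cur.2 then d.insert p.1 (cur.1, p.2)
    else if p.2 > cur.1 then d.insert p.1 (p.2, cur.2)
    else d

def max_min_reducer (sequence : List (String × Int)) (reversed : Bool) : List (String × Int × Int) :=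
  let result := sequence.foldl pvStepA PySem.Dict.empty
  if reversed then result.items.map (fun p => (p.1, p.2.2, p.2.1))
  else result.items.map (fun p => (p.1, p.2.1, p.2.2))

-- ===== PORT B =====
-- groups.setdefault(key, []).append(value) : the key's list gains value in place
def pvStepB (d : PySem.Dict String (List Int)) (p : String × Int) : PySem.Dict String (List Int) :=
  d.modify p.1 [] (fun vs => vs ++ [p.2])

-- Python max(vs) / min(vs); every group list is nonempty, so the default 0 is unreachable
def pvMax (vs : List Int) : Int := (PySem.List.max? vs (fun x => x)).getD 0
def pvMin (vs : List Int) : Int := (PySem.List.min? vs (fun x => x)).getD 0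

def max_min_reducer_alt (sequence : List (String × Int)) (reversed : Bool) : List (String × Int × Int) :=
  let groups := sequence.foldl pvStepB PySem.Dict.empty
  if reversed then groups.items.map (fun p => (p.1, pvMin p.2, pvMax p.2))
  else groups.items.map (fun p => (p.1, pvMax p.2, pvMin p.2))

-- ===== PRECONDITION & SPEC =====
def Spec_max_min_reducer (sequence : List (String × Int)) (reversed : Bool) (out : List (String × Int × Int)) : Prop := out = max_min_reducer_alt sequence reversed
instance (sequence : List (String × Int)) (reversed : Bool) (out : List (String × Int × Int)) : Decidable (Spec_max_min_reducer sequence reversed out) := by unfold Spec_max_min_reducer; infer_instance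

-- ===== CLAIM (what is proved, stated in full; the proofs are below) =====
def Claim_equal_max_min_reducer : Prop := ∀ (sequence : List (String × Int)) (reversed : Bool), Dom_max_min_reducer sequence reversed → Spec_max_min_reducer sequence reversed (max_min_reducer sequence reversed)

-- ===== LEMMAS AND PROOFS =====

lemma pvMax_cons (w : Int) (t : List Int) : pvMax (w :: t) = t.foldl max w := by
  simp [pvMax, PySem.List.max?_id_cons]

lemma pvMin_cons (w : Int) (t : List Int) : pvMin (w :: t) = t.foldl min w := by
  simp [pvMin, PySem.List.min?_id_cons]

lemma pvMax_append (w v : Int) (t : List Int) :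
    pvMax ((w :: t) ++ [v]) = max (pvMax (w :: t)) v := by
  simp [pvMax_cons, List.foldl_append]

lemma pvMin_append (w v : Int) (t : List Int) :
    pvMin ((w :: t) ++ [v]) = min (pvMin (w :: t)) v := by
  simp [pvMin_cons, List.foldl_append]

lemma pvMin_le_pvMax (w : Int) (t : List Int) : pvMin (w :: t) ≤ pvMax (w :: t) := by
  rw [pvMin_cons, pvMax_cons]
  exact le_trans (PySem.List.foldl_min_le t w).1 (PySem.List.le_foldl_max t w).1

-- A's three-way branch on the running pair equals B's reduce of the extended group
lemma pvGstep (w v : Int) (t : List Int) :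
    (if v < pvMin (w :: t) then (pvMax (w :: t), v)
     else if v > pvMax (w :: t) then (v, pvMin (w :: t))
     else (pvMax (w :: t), pvMin (w :: t)))
      = (pvMax ((w :: t) ++ [v]), pvMin ((w :: t) ++ [v])) := by
  have h := pvMin_le_pvMax w t
  rw [pvMax_append, pvMin_append]
  split_ifs with h1 h2 <;> refine Prod.ext ?_ ?_ <;> simp <;> omega

-- the main loop invariant: A's dict is the image of B's dict under per-group (max, min)
lemma pvRel (l : List (String × Int)) :
    ∀ (dA : PySem.Dict String (Int × Int)) (dB : PySem.Dict String (List Int)),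
      dB.keys.Nodup →
      (∀ p ∈ dB.items, p.2 ≠ []) →
      dA.items = dB.items.map (fun p => (p.1, pvMax p.2, pvMin p.2)) →
      (l.foldl pvStepA dA).items
        = (l.foldl pvStepB dB).items.map (fun p => (p.1, pvMax p.2, pvMin p.2)) := by
  induction l with
  | nil => intro dA dB _ _ hrel; simpa using hrel
  | cons q t ih =>
    intro dA dB hnd hne hrel
    obtain ⟨k, v⟩ := q
    have hkeys : dA.keys = dB.keys := by
      simp only [PySem.Dict.keys, hrel, List.map_map]
      rfl
    have hndA : dA.keys.Nodup := hkeys ▸ hnd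
    have hcont : dA.contains k = dB.contains k := by
      rw [PySem.Dict.contains_eq_decide_mem_keys, PySem.Dict.contains_eq_decide_mem_keys, hkeys]
    simp only [List.foldl_cons]
    by_cases hc : dB.contains k = true
    · -- key already present: B appends to the group, A updates the pair
      have hsome : (dB.get? k).isSome := by
        rw [← PySem.Dict.contains_eq_isSome_get?, hc]
      obtain ⟨vs, hvs⟩ := Option.isSome_iff_exists.mp hsome
      have hmem : (k, vs) ∈ dB.items := PySem.Dict.mem_items_of_get?_eq_some dB hvs
      have hvsne : vs ≠ [] := hne _ hmem
      obtain ⟨w, t', rfl⟩ : ∃ w t', vs = w :: t' := by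
        cases vs with
        | nil => exact absurd rfl hvsne
        | cons a b => exact ⟨a, b, rfl⟩
      have hgB : dB.getD k [] = w :: t' := PySem.Dict.getD_of_get?_eq_some dB [] hvs
      have hmemA : (k, pvMax (w :: t'), pvMin (w :: t')) ∈ dA.items := by
        rw [hrel]; exact List.mem_map_of_mem hmem
      have hgA : dA.getD k (0, 0) = (pvMax (w :: t'), pvMin (w :: t')) :=
        PySem.Dict.getD_of_mem_items dA hmemA hndA (0,0)
      -- both steps are an overwrite at key k
      have hstepB : pvStepB dB (k, v) = dB.insert k ((w :: t') ++ [v]) := by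
        show dB.modify k [] (fun vs => vs ++ [v]) = _
        rw [show dB.modify k [] (fun vs => vs ++ [v])
              = dB.insert k (dB.getD k [] ++ [v]) from rfl, hgB]
      have hcA : dA.contains k = true := hcont.trans hc
      have hstepA : pvStepA dA (k, v)
          = dA.insert k (pvMax ((w :: t') ++ [v]), pvMin ((w :: t') ++ [v])) := by
        have hg := pvGstep w v t'
        simp only [pvStepA, hcA, Bool.not_true, Bool.false_eq_true, if_false, hgA]
        rw [← hg]
        split_ifs with h1 h2
        · rfl
        · rfl
        · -- no change in A: inserting the pair the key already maps to is a no-op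
          apply PySem.Dict.ext
          rw [PySem.Dict.items_insert_of_contains dA _ hcA]
          conv_lhs => rw [← List.map_id dA.items]
          apply List.map_congr_left
          intro p hp
          obtain ⟨p1, p2⟩ := p
          by_cases hpk : p1 = k
          · subst hpk
            have h2 := PySem.Dict.getD_of_mem_items dA hp hndA (0, 0)
            rw [hgA] at h2
            simp [h2]
          · simp [hpk]
      apply ih
      · exact PySem.Dict.nodup_keys_insert dB k _ hnd
      · intro p hp
        rcases (PySem.Dict.mem_items_insert _ _ _ _).mp hp with h | h
        · subst h; simp
        · exact hne _ h.1
      · rw [hstepA, hstepB,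
            PySem.Dict.items_insert_of_contains dA _ hcA,
            PySem.Dict.items_insert_of_contains dB _ hc,
            hrel, List.map_map, List.map_map]
        apply List.map_congr_left
        intro p hp
        obtain ⟨p1, p2⟩ := p
        by_cases hpk : p1 = k
        · subst hpk
          have h2 := PySem.Dict.getD_of_mem_items dB hp hnd []
          rw [hgB] at h2
          simp [h2]
        · simp [hpk, Function.comp]
    · -- fresh key: both append at the end
      have hc' : dB.contains k = false := by simpa using hc
      have hcA : dA.contains k = false := by rw [hcont]; exact hc'
      have hstepB : pvStepB dB (k, v) = dB.insert k [v] := by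
        show dB.modify k [] (fun vs => vs ++ [v]) = _
        rw [show dB.modify k [] (fun vs => vs ++ [v])
              = dB.insert k (dB.getD k [] ++ [v]) from rfl,
            PySem.Dict.getD_of_not_contains dB [] hc']
        rfl
      have hstepA : pvStepA dA (k, v) = dA.insert k (v, v) := by
        simp [pvStepA, hcA]
      apply ih
      · exact PySem.Dict.nodup_keys_insert dB k _ hnd
      · intro p hp
        rcases (PySem.Dict.mem_items_insert _ _ _ _).mp hp with h | h
        · subst h; simp
        · exact hne _ h.1
      · rw [hstepA, hstepB,
            PySem.Dict.items_insert_of_not_contains dA _ hcA,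
            PySem.Dict.items_insert_of_not_contains dB _ hc',
            hrel, List.map_append]
        simp [pvMax, pvMin, PySem.List.max?_id_cons, PySem.List.min?_id_cons]

-- ===== VERDICT (by name: the statement is the Claim_ definition above) =====
theorem max_min_reducer_spec : Claim_equal_max_min_reducer := by
  intro sequence reversed _
  unfold Spec_max_min_reducer max_min_reducer max_min_reducer_alt
  have h := pvRel sequence PySem.Dict.empty PySem.Dict.empty
    (by simp [PySem.Dict.keys_empty]) (by simp [PySem.Dict.empty]) (by simp [PySem.Dict.empty])
  cases reversed <;> simp only [if_true, if_false, Bool.false_eq_true, h, List.map_map] <;> rfl
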